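-- pv_equiv track=rewrite | github.com/Morikko/beets-multivalue | beetsplug/virtual-multivalue.py | update_multivalue
-- ===== SOURCE A (Python) =====
-- def update_multivalue(
--     value: str, adds: list, removes: list, separator: str
-- ) -> str:
--     """
--     Add all elements in ``adds`` and remove all elements in ``removes`` to
--     ``value``.
--     """
--     multi_values = value.split(separator)
--     for a in adds:
--         if a not in multi_values:
--             multi_values.append(a)
--     for r in removes:
--         try:
--             multi_values.pop(multi_values.index(r))
--         except ValueError:
--             pass
--
--     return separator.join(multi_values)
-- ===== SOURCE B (Python) =====
-- def update_multivalue(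
--     value: str, adds: list, removes: list, separator: str
-- ) -> str:
--     """
--     Add all elements in ``adds`` and remove all elements in ``removes`` to
--     ``value``.
--     """
--     items = value.split(separator)
--     seen = set(items)
--     for a in adds:
--         if a not in seen:
--             items.append(a)
--             seen.add(a)
--     need = {}
--     for r in removes:
--         need[r] = need.get(r, 0) + 1
--     out = []
--     for x in items:
--         n = need.get(x, 0)
--         if n > 0:
--             need[x] = n - 1
--         else:
--             out.append(x)
--     return separator.join(out)
-- ===== Notes on version B (the rewrite author's own statement) =====
-- stated objective: faster
-- what changed: replaces the per-add list membership scan and the per-remove index/pop scan by a hash-set for adds and a count-map consumed in one pass over the items for first-occurrence removals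
-- outside the precondition, e.g. on update_multivalue('a', ['b'], [], ''): A raises ValueError, B raises ValueError
import Mathlib
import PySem

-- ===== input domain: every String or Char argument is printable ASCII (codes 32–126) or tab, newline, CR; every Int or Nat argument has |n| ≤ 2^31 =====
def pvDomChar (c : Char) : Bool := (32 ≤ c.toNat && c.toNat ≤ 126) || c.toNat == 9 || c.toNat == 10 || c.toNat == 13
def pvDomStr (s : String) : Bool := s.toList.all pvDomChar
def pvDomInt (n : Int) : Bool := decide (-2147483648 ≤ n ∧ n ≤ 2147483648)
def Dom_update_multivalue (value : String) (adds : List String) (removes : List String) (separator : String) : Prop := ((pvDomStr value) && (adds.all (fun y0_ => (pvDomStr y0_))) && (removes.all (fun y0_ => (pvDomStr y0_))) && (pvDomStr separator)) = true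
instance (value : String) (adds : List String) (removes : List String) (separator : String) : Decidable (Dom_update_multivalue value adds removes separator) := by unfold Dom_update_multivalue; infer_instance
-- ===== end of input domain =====

-- B replaces A's per-add list scan and per-remove index/pop scan by a hash-set for adds
-- and a count-map consumed in one pass for first-occurrence removals (objective: faster).

-- ===== PORT A =====
-- multi_values.pop(multi_values.index(r)), with the ValueError of index() caught (= no-op)
def pvPopIndex (l : List String) (r : String) : List String :=
  match PySem.List.index? l r with
  | some i =>
    match PySem.List.pop? l (i : Int) with
    | some (_, rest) => rest
    | none => l
  | none => l

def update_multivalue (value : String) (adds : List String) (removes : List String) (separator : String) : String :=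
  let multi_values := (PySem.Str.split? value separator).getD []
  let multi_values := adds.foldl (fun l a => if l.contains a then l else l ++ [a]) multi_values
  let multi_values := removes.foldl (fun l r => pvPopIndex l r) multi_values
  PySem.Str.join separator multi_values

-- ===== PORT B =====
def update_multivalue_alt (value : String) (adds : List String) (removes : List String) (separator : String) : String :=
  let items0 := (PySem.Str.split? value separator).getD []
  -- for a in adds: if a not in seen: items.append(a); seen.add(a)
  let items := (adds.foldl
      (fun (p : List String × PySem.Set String) a =>
        if PySem.Set.contains p.2 a then p else (p.1 ++ [a], PySem.Set.add p.2 a))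
      (items0, PySem.Set.ofList items0)).1
  -- need[r] = need.get(r, 0) + 1
  let need := removes.foldl
      (fun (d : PySem.Dict String Int) r => d.insert r (d.getD r 0 + 1)) PySem.Dict.empty
  -- single pass: drop x while its counter is positive
  let out := (items.foldl
      (fun (p : List String × PySem.Dict String Int) x =>
        let n := p.2.getD x 0
        if 0 < n then (p.1, p.2.insert x (n - 1)) else (p.1 ++ [x], p.2))
      ([], need)).1
  PySem.Str.join separator out

-- ===== PRECONDITION & SPEC =====
-- Python's str.split raises ValueError on an empty separator; both programs raise there.
def Pre_update_multivalue (value : String) (adds : List String) (removes : List String) (separator : String) : Prop := separator ≠ ""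
instance (value : String) (adds : List String) (removes : List String) (separator : String) : Decidable (Pre_update_multivalue value adds removes separator) := by unfold Pre_update_multivalue; infer_instance

def pvWitness_update_multivalue : String × List String × List String × String := ("a,b", ["c"], ["a"], ",")

def Spec_update_multivalue (value : String) (adds : List String) (removes : List String) (separator : String) (out : String) : Prop := out = update_multivalue_alt value adds removes separator
instance (value : String) (adds : List String) (removes : List String) (separator : String) (out : String) : Decidable (Spec_update_multivalue value adds removes separator out) := by unfold Spec_update_multivalue; infer_instance

-- ===== CLAIM (what is proved, stated in full; the proofs are below) =====
def Claim_equal_update_multivalue : Prop := ∀ (value : String) (adds : List String) (removes : List String) (separator : String), Dom_update_multivalue value adds removes separator → Pre_update_multivalue value adds removes separator → Spec_update_multivalue value adds removes separator (update_multivalue value adds removes separator)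

-- ===== LEMMAS AND PROOFS =====

-- remove the first occurrence of r (abstract form of A's index/pop step and of B's counted skip)
def pvRmFirst (r : String) : List String → List String
  | [] => []
  | x :: xs => if x = r then xs else x :: pvRmFirst r xs

-- abstract single removal pass with a function counter
def pvPassF (f : String → Nat) : List String → List String
  | [] => []
  | x :: xs =>
    if 0 < f x then pvPassF (fun y => if y = x then f y - 1 else f y) xs
    else x :: pvPassF f xs

lemma pvRmFirst_of_not_mem (r : String) (l : List String) (h : r ∉ l) :
    pvRmFirst r l = l := by
  induction l with
  | nil => rfl
  | cons x xs ih =>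
    simp only [List.mem_cons, not_or] at h
    simp [pvRmFirst, Ne.symm h.1, ih h.2]

-- A's step is first-occurrence removal
lemma pvPopIndex_eq_rmFirst (l : List String) (r : String) :
    pvPopIndex l r = pvRmFirst r l := by
  induction l with
  | nil => rfl
  | cons x xs ih =>
    by_cases hx : x = r
    · subst hx
      rw [pvPopIndex, PySem.List.index?_cons_self]
      simp [PySem.List.pop?_zero_cons, pvRmFirst]
    · rw [pvPopIndex, PySem.List.index?_cons_of_ne xs hx]
      cases hidx : PySem.List.index? xs r with
      | none =>
        have hnm : r ∉ xs := (PySem.List.index?_eq_none_iff xs r).mp hidx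
        simp [pvRmFirst, hx, pvRmFirst_of_not_mem r xs hnm]
      | some k =>
        obtain ⟨hk, -, -⟩ := PySem.List.getElem_of_index?_eq_some hidx
        simp only [Option.map_some]
        rw [PySem.List.pop?_natCast (x :: xs) (k + 1) (by simpa using Nat.succ_lt_succ hk),
          pvRmFirst, if_neg hx, ← ih, pvPopIndex, hidx]
        simp [PySem.List.pop?_natCast xs k hk]

-- counting one more r removes one more (first remaining) r
lemma pvPassF_inc (r : String) (l : List String) (f : String → Nat) :
    pvPassF (fun y => if y = r then f y + 1 else f y) l = pvRmFirst r (pvPassF f l) := by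
  induction l generalizing f with
  | nil => rfl
  | cons x xs ih =>
    by_cases hx : x = r
    · subst hx
      rw [pvPassF, if_pos (show (0:Nat) < if x = x then f x + 1 else f x by simp)]
      have hL : (fun y => if y = x then (if y = x then f y + 1 else f y) - 1
          else if y = x then f y + 1 else f y) = f := by
        funext y; by_cases h : y = x <;> simp [h]
      rw [hL]
      by_cases hfx : 0 < f x
      · have hR : (fun y => if y = x then (fun z => if z = x then f z - 1 else f z) y + 1
            else (fun z => if z = x then f z - 1 else f z) y) = f := by
          funext y; by_cases h : y = x <;> simp [h]; omega
        rw [pvPassF, if_pos hfx, ← ih (fun z => if z = x then f z - 1 else f z), hR]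
      · have hz : f x = 0 := by omega
        rw [pvPassF, if_neg hfx]
        simp [pvRmFirst]
    · have hrx : ¬ r = x := fun h => hx h.symm
      rw [pvPassF, show (if x = r then f x + 1 else f x) = f x from if_neg hx]
      by_cases hfx : 0 < f x
      · rw [if_pos hfx]
        have hstep : (fun y => if y = x then (fun z => if z = r then f z + 1 else f z) y - 1
              else (fun z => if z = r then f z + 1 else f z) y)
            = (fun y => if y = r then (fun z => if z = x then f z - 1 else f z) y + 1
              else (fun z => if z = x then f z - 1 else f z) y) := by
          funext y
          by_cases h1 : y = x <;> by_cases h2 : y = r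
          · exact absurd (h1.symm.trans h2) hx
          · simp [h1, hx]
          · simp [h2, hrx]
          · simp [h1, h2]
        rw [hstep, ih, pvPassF, if_pos hfx]
      · rw [if_neg hfx, ih, pvPassF, if_neg hfx, pvRmFirst, if_neg hx]

lemma pvPassF_zero (l : List String) : pvPassF (fun _ => 0) l = l := by
  induction l with
  | nil => rfl
  | cons x xs ih => simp [pvPassF, ih]

-- A's removal loop = one counted pass
lemma pvRemoveLoop_eq_passF (removes : List String) (l : List String) :
    removes.foldl (fun l r => pvPopIndex l r) l = pvPassF (fun x => removes.count x) l := by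
  induction removes using List.reverseRecOn with
  | nil => simp [pvPassF_zero]
  | append_singleton rs r ih =>
    rw [List.foldl_append, List.foldl_cons, List.foldl_nil, ih, pvPopIndex_eq_rmFirst,
      ← pvPassF_inc]
    congr 1
    funext y
    by_cases h : y = r
    · simp [h, List.count_append]
    · simp [List.count_append, h, Ne.symm h]

-- B's add loop (list + seen set) = A's add loop (list membership)
lemma pvAdds_eq (adds : List String) (l : List String) (s : PySem.Set String)
    (hs : ∀ x, x ∈ s ↔ x ∈ l) :
    (adds.foldl
      (fun (p : List String × PySem.Set String) a =>
        if PySem.Set.contains p.2 a then p else (p.1 ++ [a], PySem.Set.add p.2 a))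
      (l, s)).1 = adds.foldl (fun l a => if l.contains a then l else l ++ [a]) l := by
  induction adds generalizing l s with
  | nil => rfl
  | cons a as ih =>
    simp only [List.foldl_cons]
    by_cases hm : a ∈ l
    · rw [if_pos (by simpa [PySem.Set.contains_iff] using (hs a).mpr hm),
        if_pos (by simpa using hm)]
      exact ih l s hs
    · rw [if_neg (by
          simp only [PySem.Set.contains_iff]
          exact fun h => hm ((hs a).mp (by simpa using h))),
        if_neg (by simpa using hm)]
      exact ih (l ++ [a]) (PySem.Set.add s a) (by
        intro x
        rw [PySem.Set.mem_add]
        simp [hs x])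

-- B's single pass with the count dict = the abstract counted pass
lemma pvPass_eq (items : List String) (acc : List String) (d : PySem.Dict String Int)
    (f : String → Nat) (hd : ∀ x, d.getD x 0 = (f x : Int)) :
    (items.foldl
      (fun (p : List String × PySem.Dict String Int) x =>
        let n := p.2.getD x 0
        if 0 < n then (p.1, p.2.insert x (n - 1)) else (p.1 ++ [x], p.2))
      (acc, d)).1 = acc ++ pvPassF f items := by
  induction items generalizing acc d f with
  | nil => simp [pvPassF]
  | cons x xs ih =>
    simp only [List.foldl_cons, hd x]
    by_cases hfx : 0 < f x
    · rw [if_pos (by exact_mod_cast hfx), pvPassF, if_pos hfx]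
      exact ih acc (d.insert x ((f x : Int) - 1)) (fun y => if y = x then f y - 1 else f y)
        (by
          intro y
          rw [PySem.Dict.getD_insert]
          by_cases h : y = x <;> simp [h, hd y]
          omega)
    · rw [if_neg (by exact_mod_cast hfx), pvPassF, if_neg hfx]
      rw [ih (acc ++ [x]) d f hd, List.append_assoc]
      rfl

-- ===== VERDICT (by name: the statement is the Claim_ definition above) =====
theorem update_multivalue_spec : Claim_equal_update_multivalue := by
  intro value adds removes separator _ _
  unfold Spec_update_multivalue update_multivalue update_multivalue_alt
  simp only [pvRemoveLoop_eq_passF]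
  rw [pvAdds_eq adds _ _ (fun x => by simp [PySem.Set.mem_ofList]),
    pvPass_eq _ [] _ (fun x => removes.count x)
      (fun x => by
        rw [PySem.Dict.getD_foldl_insert_add_one]
        simp [PySem.Dict.getD_empty])]
  simp
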